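-- pv_equiv track=rewrite | github.com/xoaninc/App-watch | scripts/import_fgc_shapes.py | group_by_shape
-- ===== SOURCE A (Python) =====
-- from typing import Dict, List
-- from collections import defaultdict
--
-- def group_by_shape(records: List[Dict]) -> Dict[str, List[Dict]]:
--     """Group records by shape_id."""
--     grouped = defaultdict(list)
--
--     for record in records:
--         shape_id = str(record.get('shape_id', ''))
--         if shape_id:
--             grouped[shape_id].append(record)
--
--     # Sort each group by sequence
--     for shape_id in grouped:
--         grouped[shape_id].sort(key=lambda x: x.get('shape_pt_sequence', 0))
--
--     return grouped
-- ===== SOURCE B (Python) =====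
-- from typing import Dict, List
-- from collections import defaultdict
--
--
-- def _insert_sorted(group: List[Dict], record: Dict) -> List[Dict]:
--     """Return group with record inserted before the first entry with a larger sequence key."""
--     key = record.get('shape_pt_sequence', 0)
--     for i, other in enumerate(group):
--         if key < other.get('shape_pt_sequence', 0):
--             return group[:i] + [record] + group[i:]
--     return group + [record]
--
--
-- def group_by_shape(records: List[Dict]) -> Dict[str, List[Dict]]:
--     """Group records by shape_id, keeping each group sorted by sequence as it is built."""
--     grouped = defaultdict(list)
--
--     for record in records:
--         shape_id = str(record.get('shape_id', ''))
--         if shape_id: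
--             grouped[shape_id] = _insert_sorted(grouped[shape_id], record)
--
--     return grouped
-- ===== Notes on version B (the rewrite author's own statement) =====
-- stated objective: alternative
-- what changed: B builds each group already in sequence order by inserting every record at its sorted position during the single grouping pass, instead of A's append-everything-then-sort-each-group second phase.
import Mathlib
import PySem

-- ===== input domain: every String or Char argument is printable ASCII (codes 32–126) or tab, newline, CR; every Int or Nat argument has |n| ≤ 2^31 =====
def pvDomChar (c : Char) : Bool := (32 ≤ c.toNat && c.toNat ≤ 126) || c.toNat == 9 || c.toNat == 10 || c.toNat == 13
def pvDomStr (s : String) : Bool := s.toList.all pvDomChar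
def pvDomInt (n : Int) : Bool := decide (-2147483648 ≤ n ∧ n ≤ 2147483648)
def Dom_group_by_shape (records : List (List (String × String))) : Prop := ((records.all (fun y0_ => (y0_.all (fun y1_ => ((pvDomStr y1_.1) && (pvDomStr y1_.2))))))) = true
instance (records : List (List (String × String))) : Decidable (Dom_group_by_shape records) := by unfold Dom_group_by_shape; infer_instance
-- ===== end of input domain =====

-- B builds each group already sorted by inserting every record at its sequence position in one
-- pass, instead of A's append-everything-then-sort-each-group; objective: alternative decomposition.

-- ===== PORT A =====
-- str(record.get('shape_id', '')): values are str here, so str() is the identity.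
def pvSid (r : List (String × String)) : String := (PySem.Dict.mk r).getD "shape_id" ""

-- record.get('shape_pt_sequence', 0): Python's default is the int 0; under Pre_ every shape group
-- either has the key everywhere (string comparisons, exact here) or nowhere (a constant default,
-- so a stable no-op sort in both Pythons); "" is such a constant, making this port exact on Pre_.
def pvSeq (r : List (String × String)) : String := (PySem.Dict.mk r).getD "shape_pt_sequence" ""

def pvStepA (d : PySem.Dict String (List (List (String × String)))) (r : List (String × String)) :
    PySem.Dict String (List (List (String × String))) :=
  let shape_id := pvSid r
  if shape_id ≠ "" then d.insert shape_id (d.getD shape_id [] ++ [r]) else d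

def group_by_shape (records : List (List (String × String))) : List (String × List (List (String × String))) :=
  let grouped := records.foldl pvStepA PySem.Dict.empty
  let grouped := grouped.keys.foldl
    (fun d k => d.modify k [] (fun g => PySem.List.sorted g pvSeq false)) grouped
  grouped.items

-- ===== PORT B =====
-- Source B's _insert_sorted: insert record before the first entry with a larger sequence key.
def pvInsertSorted (group : List (List (String × String))) (r : List (String × String)) :
    List (List (String × String)) :=
  match group with
  | [] => [r]
  | x :: xs => if pvSeq r < pvSeq x then r :: x :: xs else x :: pvInsertSorted xs r

def pvStepB (d : PySem.Dict String (List (List (String × String)))) (r : List (String × String)) :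
    PySem.Dict String (List (List (String × String))) :=
  let shape_id := pvSid r
  if shape_id ≠ "" then d.insert shape_id (pvInsertSorted (d.getD shape_id []) r) else d

def group_by_shape_alt (records : List (List (String × String))) : List (String × List (List (String × String))) :=
  (records.foldl pvStepB PySem.Dict.empty).items

-- ===== PRECONDITION & SPEC =====
def pvHasSeq (r : List (String × String)) : Bool := ((PySem.Dict.mk r).get? "shape_pt_sequence").isSome

-- Pre_ excludes exactly the inputs where some shape group mixes records that have
-- 'shape_pt_sequence' with records that lack it: there the sort key mixes str with the int
-- default 0 and Python A raises TypeError (Python B raises the same way).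
def Pre_group_by_shape (records : List (List (String × String))) : Prop :=
  ∀ r1 ∈ records, ∀ r2 ∈ records, pvSid r1 = pvSid r2 → pvSid r1 ≠ "" → pvHasSeq r1 = pvHasSeq r2
instance (records : List (List (String × String))) : Decidable (Pre_group_by_shape records) := by
  unfold Pre_group_by_shape; infer_instance

def pvWitness_group_by_shape : (List (List (String × String))) :=
  [[("shape_id", "s1"), ("shape_pt_sequence", "2")],
   [("shape_id", "s1"), ("shape_pt_sequence", "1")],
   [("shape_id", "s2"), ("shape_pt_sequence", "9")]]

def Spec_group_by_shape (records : List (List (String × String))) (out : List (String × List (List (String × String)))) : Prop := out = group_by_shape_alt records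
instance (records : List (List (String × String))) (out : List (String × List (List (String × String)))) : Decidable (Spec_group_by_shape records out) := by unfold Spec_group_by_shape; infer_instance

-- ===== CLAIM (what is proved, stated in full; the proofs are below) =====
def Claim_equal_group_by_shape : Prop := ∀ (records : List (List (String × String))), Dom_group_by_shape records → Pre_group_by_shape records → Spec_group_by_shape records (group_by_shape records)

-- ===== LEMMAS AND PROOFS =====

def pvSortEntry (p : String × List (List (String × String))) : String × List (List (String × String)) :=
  (p.1, PySem.List.sorted p.2 pvSeq false)

def pvMapSort (d : PySem.Dict String (List (List (String × String)))) :
    PySem.Dict String (List (List (String × String))) :=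
  ⟨d.items.map pvSortEntry⟩

theorem pvInsertSorted_eq_insertBy (g : List (List (String × String))) (r : List (String × String)) :
    pvInsertSorted g r = PySem.List.insertBy (fun a b => decide (pvSeq a < pvSeq b)) r g := by
  induction g with
  | nil => rfl
  | cons x xs ih => simp [pvInsertSorted, PySem.List.insertBy, ih]

theorem pvSorted_append (g : List (List (String × String))) (r : List (String × String)) :
    PySem.List.sorted (g ++ [r]) pvSeq false = pvInsertSorted (PySem.List.sorted g pvSeq false) r := by
  rw [pvInsertSorted_eq_insertBy, PySem.List.sorted_eq_foldl_insertBy,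
    PySem.List.sorted_eq_foldl_insertBy, List.foldl_append, List.foldl_cons, List.foldl_nil]

theorem pvGet?_mapSort (d : PySem.Dict String (List (List (String × String)))) (k : String) :
    (pvMapSort d).get? k = (d.get? k).map (fun g => PySem.List.sorted g pvSeq false) := by
  simp [pvMapSort, PySem.Dict.get?, List.find?_map, Function.comp_def, pvSortEntry]

theorem pvGetD_mapSort (d : PySem.Dict String (List (List (String × String)))) (k : String) :
    (pvMapSort d).getD k [] = PySem.List.sorted (d.getD k []) pvSeq false := by
  rw [PySem.Dict.getD_eq_get?_getD, PySem.Dict.getD_eq_get?_getD, pvGet?_mapSort]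
  cases d.get? k <;> rfl

theorem pvContains_mapSort (d : PySem.Dict String (List (List (String × String)))) (k : String) :
    (pvMapSort d).contains k = d.contains k := by
  simp [pvMapSort, PySem.Dict.contains, List.any_map, Function.comp_def, pvSortEntry]

theorem pvInsert_mapSort (d : PySem.Dict String (List (List (String × String)))) (k : String)
    (v : List (List (String × String))) :
    (pvMapSort d).insert k (PySem.List.sorted v pvSeq false) = pvMapSort (d.insert k v) := by
  apply PySem.Dict.ext
  show (PySem.Dict.insert (pvMapSort d) k _).items = (d.insert k v).items.map pvSortEntry
  rw [PySem.Dict.items_insert, PySem.Dict.items_insert, pvContains_mapSort]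
  by_cases h : d.contains k = true
  · rw [if_pos h, if_pos h,
      show (pvMapSort d).items = d.items.map pvSortEntry from rfl, List.map_map, List.map_map]
    refine List.map_congr_left (fun p _ => ?_)
    by_cases hk : p.1 = k <;> simp [pvSortEntry, hk]
  · rw [if_neg h, if_neg h, show (pvMapSort d).items = d.items.map pvSortEntry from rfl,
      List.map_append]
    rfl

theorem pvStepB_mapSort (d : PySem.Dict String (List (List (String × String))))
    (r : List (String × String)) : pvStepB (pvMapSort d) r = pvMapSort (pvStepA d r) := by
  simp only [pvStepA, pvStepB]
  by_cases h : pvSid r ≠ ""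
  · rw [if_pos h, if_pos h, pvGetD_mapSort, ← pvSorted_append, pvInsert_mapSort]
  · rw [if_neg h, if_neg h]

theorem pvFoldB_mapSort (records : List (List (String × String)))
    (d : PySem.Dict String (List (List (String × String)))) :
    records.foldl pvStepB (pvMapSort d) = pvMapSort (records.foldl pvStepA d) := by
  induction records generalizing d with
  | nil => rfl
  | cons r rs ih => rw [List.foldl_cons, List.foldl_cons, pvStepB_mapSort, ih]

theorem pvNodupA (records : List (List (String × String)))
    (d : PySem.Dict String (List (List (String × String)))) (h : d.keys.Nodup) :
    (records.foldl pvStepA d).keys.Nodup := by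
  induction records generalizing d with
  | nil => exact h
  | cons r rs ih =>
    refine ih _ ?_
    simp only [pvStepA]
    by_cases hs : pvSid r ≠ ""
    · rw [if_pos hs]; exact PySem.Dict.nodup_keys_insert _ _ _ h
    · rw [if_neg hs]; exact h

theorem pvModFold (ks : List String) (d : PySem.Dict String (List (List (String × String))))
    (hd : d.keys.Nodup) (hks : ks.Nodup) (hsub : ∀ k ∈ ks, k ∈ d.keys) :
    (ks.foldl (fun d k => d.modify k [] (fun g => PySem.List.sorted g pvSeq false)) d).items
      = d.items.map (fun p => if p.1 ∈ ks then pvSortEntry p else p) := by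
  induction ks generalizing d with
  | nil => simp
  | cons k ks ih =>
    have hk : d.contains k = true := (PySem.Dict.contains_iff_mem_keys d k).mpr (hsub k (by simp))
    have hit : (d.modify k [] (fun g => PySem.List.sorted g pvSeq false)).items
        = d.items.map (fun p => if (p.1 == k) = true
            then (k, PySem.List.sorted (d.getD k []) pvSeq false) else p) :=
      PySem.Dict.items_insert_of_contains d _ hk
    have hkeys : (d.modify k [] (fun g => PySem.List.sorted g pvSeq false)).keys = d.keys :=
      PySem.Dict.keys_insert_of_contains d _ hk
    rw [List.foldl_cons, ih _ (hkeys ▸ hd) (List.Nodup.of_cons hks)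
      (fun k' h' => hkeys ▸ hsub k' (List.mem_cons_of_mem _ h')), hit, List.map_map]
    refine List.map_congr_left (fun p hp => ?_)
    by_cases hpk : p.1 = k
    · have hb : (p.1 == k) = true := by simp [hpk]
      have hmem : (k, p.2) ∈ d.items := by rw [← hpk]; exact hp
      have hgd : d.getD k [] = p.2 := PySem.Dict.getD_of_mem_items d hmem hd []
      have hkn : k ∉ ks := (List.nodup_cons.mp hks).1
      simp [hkn, hpk, hgd, pvSortEntry, List.mem_cons]
    · have hb : (p.1 == k) = false := by simp [hpk]
      simp [hpk, List.mem_cons]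

-- ===== VERDICT (by name: the statement is the Claim_ definition above) =====
theorem group_by_shape_spec : Claim_equal_group_by_shape := by
  intro records _ _
  show group_by_shape records = group_by_shape_alt records
  simp only [group_by_shape, group_by_shape_alt]
  have hnd : (records.foldl pvStepA PySem.Dict.empty).keys.Nodup :=
    pvNodupA records PySem.Dict.empty PySem.Dict.nodup_keys_empty
  have hB : records.foldl pvStepB PySem.Dict.empty
      = pvMapSort (records.foldl pvStepA PySem.Dict.empty) :=
    pvFoldB_mapSort records PySem.Dict.empty
  rw [hB, pvModFold _ _ hnd hnd (fun _ h => h)]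
  refine List.map_congr_left (fun p hp => ?_)
  rw [if_pos (PySem.Dict.mem_keys_of_mem_items _ hp)]
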